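-- pv_equiv track=rewrite | github.com/kuangsangudu/algorithm | atcoder/AtCoder Regular Contest 139/B2.py | solution
-- ===== SOURCE A (Python) =====
-- import collections
-- import math
--
-- def comb(n, m, Mod):
--     return (math.factorial(n)//(math.factorial(n-m)*math.factorial(m))) % Mod
--
-- def solution(S):
--     # write your code in Python 3.6
--     vowels_num, consonants_num = 0, 0
--     vowels = "AEIOU"
--     v, c = collections.defaultdict(int), collections.defaultdict(int)
--     Mod = 10 ** 9 + 7
--     for i in S:
--         if i in vowels:
--             v[i] += 1
--             vowels_num += 1
--         else:
--             c[i] += 1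
--             consonants_num += 1
--     if consonants_num == vowels_num + 1 or consonants_num == vowels_num:
--         ret = 1
--         for val in v.values():
--             ret = ret * comb(vowels_num, val, Mod) % Mod
--             vowels_num -= val
--         for val in c.values():
--             ret = ret * comb(consonants_num, val, Mod) % Mod
--             consonants_num -= val
--         return ret
--     else:
--         return 0
-- ===== SOURCE B (Python) =====
-- import collections
-- import math
--
-- def solution(S):
--     MOD = 10 ** 9 + 7
--     vowels = "AEIOU"
--     vs = [ch for ch in S if ch in vowels]
--     cs = [ch for ch in S if ch not in vowels]
--     vn, cn = len(vs), len(cs)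
--     if cn != vn and cn != vn + 1:
--         return 0
--     denom = 1
--     for cnt in collections.Counter(vs).values():
--         denom *= math.factorial(cnt)
--     for cnt in collections.Counter(cs).values():
--         denom *= math.factorial(cnt)
--     return (math.factorial(vn) * math.factorial(cn) // denom) % MOD
-- ===== Notes on version B (the rewrite author's own statement) =====
-- stated objective: faster
-- what changed: A telescopes per-letter binomial coefficients, recomputing a full big-int factorial for every distinct letter; B filters vowels/consonants once and evaluates the two multinomial coefficients directly as one factorial product divided by the product of count factorials, taken mod p at the end.
import Mathlib
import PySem

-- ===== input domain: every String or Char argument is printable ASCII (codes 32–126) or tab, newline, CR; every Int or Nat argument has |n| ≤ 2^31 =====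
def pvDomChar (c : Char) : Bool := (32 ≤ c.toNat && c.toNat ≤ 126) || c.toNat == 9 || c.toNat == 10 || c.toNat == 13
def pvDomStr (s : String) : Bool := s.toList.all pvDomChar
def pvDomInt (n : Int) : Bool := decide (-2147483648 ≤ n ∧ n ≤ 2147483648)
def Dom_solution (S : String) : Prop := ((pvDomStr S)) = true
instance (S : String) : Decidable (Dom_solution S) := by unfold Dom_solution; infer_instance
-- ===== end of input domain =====

-- B replaces A's per-letter telescoping binomials (one full factorial per distinct letter)
-- by a single direct multinomial: filter vowels/consonants once, then one factorial product
-- divided by the product of the count factorials, reduced mod p at the end.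

-- ===== PORT A =====
-- `i in "AEIOU"` on a single character = character membership (exact for 1-char strings)
def vowelChars : List Char := ['A', 'E', 'I', 'O', 'U']

-- comb(n, m, Mod); math.factorial ported through .toNat — exact here since every call A
-- makes has 0 ≤ m ≤ n (counts and their telescoping remainders)
def combA (n m M : Int) : Int :=
  PySem.Int.mod
    (PySem.Int.floordiv (n.toNat.factorial : Int)
      (((n - m).toNat.factorial : Int) * (m.toNat.factorial : Int))) M

def solution (S : String) : Int :=
  let Mod : Int := 10 ^ 9 + 7
  let st := S.toList.foldl
    (fun (st : Int × Int × PySem.Dict Char Int × PySem.Dict Char Int) i =>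
      if vowelChars.contains i then
        (st.1 + 1, st.2.1, (st.2.2.1).modify i 0 (· + 1), st.2.2.2)
      else
        (st.1, st.2.1 + 1, st.2.2.1, (st.2.2.2).modify i 0 (· + 1)))
    (0, 0, PySem.Dict.empty, PySem.Dict.empty)
  let vowels_num := st.1
  let consonants_num := st.2.1
  let v := st.2.2.1
  let c := st.2.2.2
  if consonants_num = vowels_num + 1 ∨ consonants_num = vowels_num then
    let p1 := v.values.foldl
      (fun (p : Int × Int) val => (PySem.Int.mod (p.1 * combA p.2 val Mod) Mod, p.2 - val))
      (1, vowels_num)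
    let p2 := c.values.foldl
      (fun (p : Int × Int) val => (PySem.Int.mod (p.1 * combA p.2 val Mod) Mod, p.2 - val))
      (p1.1, consonants_num)
    p2.1
  else 0

-- ===== PORT B =====
-- denom loop of Source B: multiply in factorial(cnt) for every counter value (counts are ≥ 0)
def factProd (vals : List Int) (init : Int) : Int :=
  vals.foldl (fun d cnt => d * (cnt.toNat.factorial : Int)) init

def solution_alt (S : String) : Int :=
  let MOD : Int := 10 ^ 9 + 7
  let vs := S.toList.filter (fun ch => vowelChars.contains ch)
  let cs := S.toList.filter (fun ch => !vowelChars.contains ch)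
  let vn : Int := vs.length
  let cn : Int := cs.length
  if cn ≠ vn ∧ cn ≠ vn + 1 then 0
  else
    let denom := factProd (PySem.Dict.counter cs).values (factProd (PySem.Dict.counter vs).values 1)
    PySem.Int.mod
      (PySem.Int.floordiv ((vn.toNat.factorial : Int) * (cn.toNat.factorial : Int)) denom) MOD

-- ===== PRECONDITION & SPEC =====
def Spec_solution (S : String) (out : Int) : Prop := out = solution_alt S
instance (S : String) (out : Int) : Decidable (Spec_solution S out) := by unfold Spec_solution; infer_instance

-- ===== CLAIM (what is proved, stated in full; the proofs are below) =====
def Claim_equal_solution : Prop := ∀ (S : String), Dom_solution S → Spec_solution S (solution S)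

-- ===== LEMMAS AND PROOFS =====

-- the exact telescoping product A's value-loop computes: C(n,x₁)·C(n-x₁,x₂)·…
def teleP : Nat → List Nat → Nat
  | _, [] => 1
  | n, x :: xs => n.choose x * teleP (n - x) xs

-- product of factorials of a list of (Nat) counts
def prodF (ns : List Nat) : Nat := (ns.map Nat.factorial).prod

lemma prodF_pos (ns : List Nat) : 0 < prodF ns := by
  induction ns with
  | nil => simp [prodF]
  | cons x xs ih =>
      simpa [prodF, List.map_cons, List.prod_cons] using
        Nat.mul_pos x.factorial_pos ih

-- telescoping identity: teleP n ns * prodF ns * (n - sum ns)! = n!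
lemma teleP_mul (ns : List Nat) : ∀ n, ns.sum ≤ n →
    teleP n ns * prodF ns * (n - ns.sum).factorial = n.factorial := by
  induction ns with
  | nil => intro n _; simp [teleP, prodF]
  | cons x xs ih =>
      intro n h
      have hx : x ≤ n := le_trans (by rw [List.sum_cons]; omega) h
      have hxs : xs.sum ≤ n - x := by
        have := List.sum_cons (a := x) (l := xs); omega
      have hsub : n - (x :: xs).sum = (n - x) - xs.sum := by
        rw [List.sum_cons]; omega
      have ihx := ih (n - x) hxs
      have hc := Nat.choose_mul_factorial_mul_factorial hx
      calc teleP n (x :: xs) * prodF (x :: xs) * (n - (x :: xs).sum).factorial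
          = n.choose x * x.factorial *
              (teleP (n - x) xs * prodF xs * ((n - x) - xs.sum).factorial) := by
              rw [hsub]
              simp only [teleP, prodF, List.map_cons, List.prod_cons]
              ring
        _ = n.choose x * x.factorial * (n - x).factorial := by rw [ihx]
        _ = n.factorial := by rw [← hc]
lemma teleP_eq_div (ns : List Nat) (n : Nat) (h : ns.sum = n) :
    teleP n ns = n.factorial / prodF ns := by
  have := teleP_mul ns n (le_of_eq h)
  rw [h] at this
  simp at this
  exact (Nat.div_eq_of_eq_mul_left (prodF_pos ns) (by omega)).symm

lemma prodF_dvd (ns : List Nat) (n : Nat) (h : ns.sum = n) :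
    prodF ns ∣ n.factorial := by
  have := teleP_mul ns n (le_of_eq h)
  rw [h] at this; simp at this
  exact Dvd.intro_left _ this

-- A's fold over the whole string = counts + counters of the two filtered lists
lemma foldA_char (l : List Char) : ∀ (a b : Int) (dv dc : PySem.Dict Char Int),
    l.foldl
      (fun (st : Int × Int × PySem.Dict Char Int × PySem.Dict Char Int) i =>
        if vowelChars.contains i then
          (st.1 + 1, st.2.1, (st.2.2.1).modify i 0 (· + 1), st.2.2.2)
        else
          (st.1, st.2.1 + 1, st.2.2.1, (st.2.2.2).modify i 0 (· + 1)))
      (a, b, dv, dc)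
    = (a + ((l.filter (fun ch => vowelChars.contains ch)).length : Int),
       b + ((l.filter (fun ch => !vowelChars.contains ch)).length : Int),
       (l.filter (fun ch => vowelChars.contains ch)).foldl (fun d x => d.modify x 0 (· + 1)) dv,
       (l.filter (fun ch => !vowelChars.contains ch)).foldl (fun d x => d.modify x 0 (· + 1)) dc) := by
  induction l with
  | nil => intro a b dv dc; simp
  | cons x xs ih =>
      intro a b dv dc
      rw [List.foldl_cons]
      by_cases hx : vowelChars.contains x = true
      · rw [if_pos hx, ih]
        rw [show List.filter (fun ch => vowelChars.contains ch) (x :: xs)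
            = x :: List.filter (fun ch => vowelChars.contains ch) xs by
          rw [List.filter_cons, if_pos hx]]
        rw [show List.filter (fun ch => !vowelChars.contains ch) (x :: xs)
            = List.filter (fun ch => !vowelChars.contains ch) xs by
          rw [List.filter_cons, if_neg (by rw [hx]; decide)]]
        rw [List.foldl_cons]
        simp only [Prod.ext_iff, List.length_cons]
        and_intros <;> (push_cast; try ring)
      · have hb : vowelChars.contains x = false := by
          cases hcc : vowelChars.contains x
          · rfl
          · exact absurd hcc hx
        rw [if_neg hx, ih]
        rw [show List.filter (fun ch => vowelChars.contains ch) (x :: xs)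
            = List.filter (fun ch => vowelChars.contains ch) xs by
          rw [List.filter_cons, if_neg (by rw [hb]; decide)]]
        rw [show List.filter (fun ch => !vowelChars.contains ch) (x :: xs)
            = x :: List.filter (fun ch => !vowelChars.contains ch) xs by
          rw [List.filter_cons, if_pos (by rw [hb]; decide)]]
        rw [List.foldl_cons]
        simp only [Prod.ext_iff, List.length_cons]
        and_intros <;> (push_cast; try ring)

-- counter values as casts of Nat counts over the distinct elements
lemma counter_values (xs : List Char) :
    (PySem.Dict.counter xs).values
      = ((PySem.Set.ofList xs).map (fun k => xs.count k)).map (fun k : Nat => (k : Int)) := by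
  have : (PySem.Dict.counter xs).values = (PySem.Dict.counter xs).items.map (·.2) := rfl
  rw [this, PySem.Dict.items_counter, List.map_map, List.map_map]
  rfl

-- sum of the counts over the distinct elements is the length
lemma sum_counts (xs : List Char) :
    ((PySem.Set.ofList xs).map (fun k => xs.count k)).sum = xs.length := by
  have hperm : (PySem.Set.ofList xs).Perm xs.dedup := by
    refine (List.perm_ext_iff_of_nodup (PySem.Set.nodup_ofList xs) xs.nodup_dedup).2 ?_
    intro a; rw [PySem.Set.mem_ofList, List.mem_dedup]
  calc ((PySem.Set.ofList xs).map (fun k => xs.count k)).sum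
      = (xs.dedup.map (fun k => xs.count k)).sum := (hperm.map _).sum_eq
    _ = xs.length := xs.sum_map_count_dedup_eq_length

-- (10^9+7 : Int) is positive; A's and B's `%` is emod
lemma modP_pos : (0 : Int) < 10 ^ 9 + 7 := by norm_num

-- combA on cast arguments with m ≤ n is choose mod M
lemma combA_cast (n m : Nat) (h : m ≤ n) (M : Int) :
    combA (n : Int) (m : Int) M = PySem.Int.mod ((n.choose m : Nat) : Int) M := by
  unfold combA
  have hsub : ((n : Int) - (m : Int)).toNat = n - m := by omega
  rw [hsub]
  simp only [Int.toNat_natCast]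
  rw [show ((n - m).factorial : Int) * (m.factorial : Int) = (((n - m).factorial * m.factorial : Nat) : Int) by push_cast; ring]
  rw [PySem.Int.floordiv_natCast]
  congr 2
  rw [Nat.choose_eq_factorial_div_factorial h, Nat.mul_comm]

-- A's value-loop over cast Nat counts summing to ≤ n computes r * teleP mod M
lemma fold_vals (M : Int) (hM : 0 < M) (ns : List Nat) : ∀ (n : Nat) (r : Int), ns.sum ≤ n →
    r % M = r →
    ((ns.map (fun k : Nat => (k : Int))).foldl
        (fun (p : Int × Int) val => (PySem.Int.mod (p.1 * combA p.2 val M) M, p.2 - val))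
        (r, (n : Int))).1
      = (r * ((teleP n ns : Nat) : Int)) % M := by
  induction ns with
  | nil =>
      intro n r _ hr
      simpa [teleP] using hr.symm
  | cons x xs ih =>
      intro n r h hr
      have hx : x ≤ n := le_trans (by rw [List.sum_cons]; omega) h
      have hxs : xs.sum ≤ n - x := by have := List.sum_cons (a := x) (l := xs); omega
      have hcast : (n : Int) - (x : Int) = ((n - x : Nat) : Int) := by omega
      simp only [List.map_cons, List.foldl_cons, hcast]
      rw [ih (n - x) _ hxs (by simp [PySem.Int.mod_eq_emod_of_pos hM, Int.emod_emod_of_dvd])]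
      rw [combA_cast n x hx M]
      simp only [PySem.Int.mod_eq_emod_of_pos hM]
      rw [show teleP n (x :: xs) = n.choose x * teleP (n - x) xs from rfl]
      push_cast
      conv_lhs => rw [Int.mul_emod, Int.emod_emod_of_dvd _ (dvd_refl M)]
      rw [← Int.mul_emod]
      rw [show r * ((n.choose x : Int) % M) * ((teleP (n - x) xs : Nat) : Int)
            = ((n.choose x : Int) % M) * (r * ((teleP (n - x) xs : Nat) : Int)) by ring]
      rw [Int.mul_emod, Int.emod_emod_of_dvd _ (dvd_refl M), ← Int.mul_emod]
      congr 1; try ring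

-- B's denom loop over cast Nat counts is the cast of init * prodF
lemma factProd_cast (ns : List Nat) : ∀ (d : Nat),
    factProd (ns.map (fun k : Nat => (k : Int))) (d : Int) = ((d * prodF ns : Nat) : Int) := by
  induction ns with
  | nil => intro d; simp [factProd, prodF]
  | cons x xs ih =>
      intro d
      have : (d : Int) * (x.factorial : Int) = ((d * x.factorial : Nat) : Int) := by push_cast; ring
      simp only [factProd, List.map_cons, List.foldl_cons, Int.toNat_natCast, this]
      rw [show (xs.map (fun k : Nat => (k : Int))).foldl
            (fun d cnt => d * (cnt.toNat.factorial : Int)) ((d * x.factorial : Nat) : Int)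
            = factProd (xs.map (fun k : Nat => (k : Int))) ((d * x.factorial : Nat) : Int) from rfl]
      rw [ih]
      congr 1
      simp [prodF, List.map_cons, List.prod_cons]; ring

-- ===== VERDICT (by name: the statement is the Claim_ definition above) =====
theorem solution_spec : Claim_equal_solution := by
  intro S _
  show solution S = solution_alt S
  unfold solution solution_alt
  rw [foldA_char]
  simp only [zero_add]
  rw [← PySem.Dict.counter_eq_foldl, ← PySem.Dict.counter_eq_foldl]
  rw [counter_values, counter_values]
  set vsl := List.filter (fun ch => vowelChars.contains ch) S.toList with hvs
  set csl := List.filter (fun ch => !vowelChars.contains ch) S.toList with hcs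
  set nsv := (PySem.Set.ofList vsl).map (fun k => vsl.count k) with hnsv
  set nsc := (PySem.Set.ofList csl).map (fun k => csl.count k) with hnsc
  have hsumv : nsv.sum = vsl.length := sum_counts vsl
  have hsumc : nsc.sum = csl.length := sum_counts csl
  have hM : (0:Int) < 10 ^ 9 + 7 := modP_pos
  by_cases hc : ((csl.length : Int) = (vsl.length : Int) + 1 ∨ (csl.length : Int) = (vsl.length : Int))
  · rw [if_pos hc, if_neg (by tauto)]
    rw [fold_vals _ hM nsv vsl.length 1 (le_of_eq hsumv) (by norm_num)]
    rw [fold_vals _ hM nsc csl.length _ (le_of_eq hsumc) (Int.emod_emod_of_dvd _ (dvd_refl _))]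
    rw [show (1:Int) = ((1:Nat):Int) from rfl, factProd_cast, Nat.one_mul, factProd_cast]
    simp only [Int.toNat_natCast]
    rw [show ((vsl.length.factorial : Int) * (csl.length.factorial : Int))
          = (((vsl.length.factorial * csl.length.factorial : Nat)) : Int) by push_cast; ring]
    rw [PySem.Int.floordiv_natCast, PySem.Int.mod_eq_emod_of_pos hM]
    rw [← Nat.div_mul_div_comm (prodF_dvd nsv _ hsumv) (prodF_dvd nsc _ hsumc)]
    rw [← teleP_eq_div nsv _ hsumv, ← teleP_eq_div nsc _ hsumc]
    push_cast
    rw [one_mul]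
    conv_lhs => rw [Int.mul_emod]
    rw [Int.emod_emod_of_dvd _ (dvd_refl _), ← Int.mul_emod]
  · rw [if_neg hc, if_pos (by tauto)]
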